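-- pv_equiv track=rewrite | github.com/TaoishTechy/Braillestream | src/braillestream/mapping.py | mask_to_row_major_bits
-- ===== SOURCE A (Python) =====
-- BRAILLE_COUNT = 256
--
-- BRAILLE_BIT_TO_ROW_MAJOR: tuple[int, ...] = (
--     0,  # dot 1 -> row-major 0
--     2,  # dot 2 -> row-major 2
--     4,  # dot 3 -> row-major 4
--     1,  # dot 4 -> row-major 1
--     3,  # dot 5 -> row-major 3
--     5,  # dot 6 -> row-major 5
--     6,  # dot 7 -> row-major 6
--     7,  # dot 8 -> row-major 7
-- )
--
-- def clamp_mask(mask: int) -> int: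
--     """
--     Clamp an integer to the valid 8-bit Braille mask range.
--
--     Parameters
--     ----------
--     mask:
--         Any integer.
--
--     Returns
--     -------
--     int
--         Integer in range 0..255.
--     """
--     return max(0, min(BRAILLE_COUNT - 1, int(mask)))
--
-- def mask_to_row_major_bits(mask: int) -> tuple[int, ...]:
--     """
--     Convert a Unicode Braille mask into 8 row-major 2×4 bits.
--
--     Output order:
--
--         0 1
--         2 3
--         4 5
--         6 7
--
--     Returns
--     -------
--     tuple[int, ...]
--         Eight 0/1 values.
--     """
--     mask = clamp_mask(mask)
--     bits = [0] * 8
--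
--     for braille_bit in range(8):
--         if mask & (1 << braille_bit):
--             row_major_index = BRAILLE_BIT_TO_ROW_MAJOR[braille_bit]
--             bits[row_major_index] = 1
--
--     return tuple(bits)
-- ===== SOURCE B (Python) =====
-- def mask_to_row_major_bits(mask):
--     # The braille mask is two 3-bit columns (dots 1-3 and 4-6) plus a bottom
--     # row (dots 7,8); row-major order interleaves the columns row by row.
--     m = max(0, min(255, int(mask)))
--     left = m & 7
--     right = (m >> 3) & 7
--     out = []
--     for r in range(3):
--         out.append((left >> r) & 1)
--         out.append((right >> r) & 1)
--     out.append((m >> 6) & 1)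
--     out.append((m >> 7) & 1)
--     return tuple(out)
-- ===== Notes on version B (the rewrite author's own statement) =====
-- stated objective: alternative
-- what changed: Drops the permutation table entirely: B splits the clamped mask into the two three-bit column fields (left and right dot columns) plus the two bottom-row bits, and interleaves the columns row by row, instead of A's scatter of each braille bit through BRAILLE_BIT_TO_ROW_MAJOR into a mutable zero list.
import Mathlib
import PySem

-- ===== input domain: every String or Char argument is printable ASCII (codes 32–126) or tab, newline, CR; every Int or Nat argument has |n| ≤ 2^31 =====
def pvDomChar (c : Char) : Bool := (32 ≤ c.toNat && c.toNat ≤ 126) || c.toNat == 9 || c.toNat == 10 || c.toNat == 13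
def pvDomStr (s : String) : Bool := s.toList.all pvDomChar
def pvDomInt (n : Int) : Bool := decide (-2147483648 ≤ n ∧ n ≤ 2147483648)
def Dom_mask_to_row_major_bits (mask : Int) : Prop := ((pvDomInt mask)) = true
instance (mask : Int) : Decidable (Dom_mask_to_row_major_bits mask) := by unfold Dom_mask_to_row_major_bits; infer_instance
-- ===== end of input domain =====

-- B replaces the table-driven scatter by splitting the mask into two 3-bit column fields plus the bottom-row bits and interleaving them; objective: alternative (no table, no mutable list).

-- ===== PORT A =====
-- BRAILLE_BIT_TO_ROW_MAJOR
def brailleBitToRowMajor : List Nat := [0, 2, 4, 1, 3, 5, 6, 7]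

-- clamp_mask: max(0, min(255, int(mask)))
def clamp_mask (mask : Int) : Int := max 0 (min 255 mask)

-- scatter loop: bits = [0]*8; for braille_bit in range(8): if mask & (1 << braille_bit): bits[idx] = 1
def mask_to_row_major_bits (mask : Int) : List Int :=
  let m := clamp_mask mask
  let bits : List Int := List.replicate 8 0
  -- m ≥ 0 after clamp, so Python's 'mask & (1 << b)' is exact on Nat
  (List.range 8).foldl
    (fun bits brailleBit =>
      if m.toNat &&& (1 <<< brailleBit) ≠ 0 then
        bits.set (brailleBitToRowMajor.getD brailleBit 0) 1
      else bits)
    bits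

-- ===== PORT B =====
-- m = max(0, min(255, int(mask)))  — B's own clamp
def clamp_mask_b (mask : Int) : Int := max 0 (min 255 mask)

-- left = m & 7; right = (m >> 3) & 7; interleave three rows, then bottom bits 6,7
def mask_to_row_major_bits_alt (mask : Int) : List Int :=
  let m := (clamp_mask_b mask).toNat   -- m ≥ 0 after clamp, so Nat bit ops are exact
  let left := m &&& 7
  let right := (m >>> 3) &&& 7
  let out :=
    (List.range 3).foldl
      (fun out r => out ++ [(((left >>> r) &&& 1 : Nat) : Int), (((right >>> r) &&& 1 : Nat) : Int)])
      ([] : List Int)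
  out ++ [(((m >>> 6) &&& 1 : Nat) : Int), (((m >>> 7) &&& 1 : Nat) : Int)]

-- ===== PRECONDITION & SPEC =====
def Spec_mask_to_row_major_bits (mask : Int) (out : List Int) : Prop := out = mask_to_row_major_bits_alt mask
instance (mask : Int) (out : List Int) : Decidable (Spec_mask_to_row_major_bits mask out) := by unfold Spec_mask_to_row_major_bits; infer_instance

-- ===== CLAIM =====
def Claim_equal_mask_to_row_major_bits : Prop := ∀ (mask : Int), Dom_mask_to_row_major_bits mask → Spec_mask_to_row_major_bits mask (mask_to_row_major_bits mask)

-- ===== LEMMAS AND PROOFS =====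

-- both programs agree on every clamped value 0..255
set_option maxRecDepth 4000 in
theorem agree_on_clamped : ∀ n : Fin 256, mask_to_row_major_bits (n : Int) = mask_to_row_major_bits_alt (n : Int) := by decide

theorem clamp_range (mask : Int) : 0 ≤ clamp_mask mask ∧ clamp_mask mask ≤ 255 := by
  unfold clamp_mask; omega

theorem clamp_idem (mask : Int) : clamp_mask (clamp_mask mask) = clamp_mask mask := by
  unfold clamp_mask; omega

theorem portA_clamp (mask : Int) : mask_to_row_major_bits (clamp_mask mask) = mask_to_row_major_bits mask := by
  unfold mask_to_row_major_bits; rw [clamp_idem]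

theorem portB_clamp (mask : Int) : mask_to_row_major_bits_alt (clamp_mask mask) = mask_to_row_major_bits_alt mask := by
  unfold mask_to_row_major_bits_alt
  have h : clamp_mask_b (clamp_mask mask) = clamp_mask_b mask := by
    unfold clamp_mask_b clamp_mask; omega
  rw [h]

-- ===== VERDICT =====
theorem mask_to_row_major_bits_spec : Claim_equal_mask_to_row_major_bits := by
  intro mask _
  unfold Spec_mask_to_row_major_bits
  have h := clamp_range mask
  have hn : clamp_mask mask = ((clamp_mask mask).toNat : Int) := by omega
  have hlt : (clamp_mask mask).toNat < 256 := by omega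
  have := agree_on_clamped ⟨(clamp_mask mask).toNat, hlt⟩
  rw [← portA_clamp mask, ← portB_clamp mask, hn]
  exact this
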